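-- pv_equiv track=rewrite | github.com/ByeongGil-Jung/2018-Artificial-Intelligence | PBL_2/entire_prediction_code(parallel).py | draw_to_end_by_col
-- ===== SOURCE A (Python) =====
-- import copy
-- import copy
--
-- def draw_to_end_by_col(image_input):
--     image = copy.copy(image_input)
--     col_image = [[] for i in range(28)]
--     for row in image:
--         for item_n in range(len(row)):
--             col_image[item_n].append(row[item_n])
--     image = col_image
--     new_image = []
--     for row in image:
--         new_row = list(row)
--         threshold = 128
--         start_point = 0
--         last_point = 0
--         for i in range(len(row)):
--             if row[i] > threshold:
--                 start_point = i
--                 break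
--         for i in reversed(range(len(row))):
--             if row[i] > threshold:
--                 last_point = i
--                 break
--         for i in range(start_point, last_point):
--             new_row[i] = 255
--         new_image += new_row
--     return new_image
-- ===== SOURCE B (Python) =====
-- def draw_to_end_by_col(image_input):
--     out = []
--     for j in range(28):
--         # online run-buffer pass down column j: no endpoint search, no fill step
--         emitted, buf, seen = [], [], False
--         for row in image_input:
--             if j < len(row):
--                 v = row[j]
--                 if v > 128:
--                     emitted.extend([255] * len(buf) if seen else buf)
--                     buf = [v]
--                     seen = True
--                 else:
--                     buf.append(v)
--         out += emitted + buf
--     return out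
-- ===== Notes on version B (the rewrite author's own statement) =====
-- stated objective: alternative
-- what changed: B replaces A's offline pipeline (transpose, forward break-scan for the first bright index, backward break-scan for the last, then an index-range fill) by an online run-buffer algorithm: it streams each column once, keeping an emitted prefix and a buffer of values since the last bright pixel, and each time a new bright pixel arrives converts the buffered run to 255s; no bright index is ever computed and no fill loop exists.
import Mathlib
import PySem

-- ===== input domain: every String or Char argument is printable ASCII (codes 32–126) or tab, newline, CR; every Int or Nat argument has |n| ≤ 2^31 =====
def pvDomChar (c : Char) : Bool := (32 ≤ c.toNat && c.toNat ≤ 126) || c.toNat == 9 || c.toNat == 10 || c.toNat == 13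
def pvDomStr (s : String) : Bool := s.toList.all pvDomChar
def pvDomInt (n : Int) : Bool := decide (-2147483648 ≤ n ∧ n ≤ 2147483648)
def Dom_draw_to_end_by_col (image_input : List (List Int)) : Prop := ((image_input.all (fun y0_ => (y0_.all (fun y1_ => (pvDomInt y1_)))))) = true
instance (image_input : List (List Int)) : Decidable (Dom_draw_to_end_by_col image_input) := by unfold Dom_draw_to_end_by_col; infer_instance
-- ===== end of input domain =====

-- B replaces A's transpose + two endpoint break-scans + range fill by an online run-buffer
-- streaming pass over each column (objective: alternative algorithm, similar cost).

-- ===== PORT A =====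
-- 'for i in range(len(row)): if row[i] > threshold: start_point = i; break'
def scanFirstA : List Int → Int → Int
  | [], _ => 0
  | x :: xs, i => if x > 128 then i else scanFirstA xs (i + 1)

-- 'for i in reversed(range(len(row))): if row[i] > threshold: last_point = i; break'
def scanLastA : List Int → Int → Int
  | [], _ => 0
  | x :: xs, i => if x > 128 then i else scanLastA xs (i - 1)

-- the per-row body of A's second loop: list(row); the two scans; 'for i in range(start, last): new_row[i] = 255'
def fillRowA (row : List Int) : List Int :=
  let start_point := scanFirstA row 0
  let last_point := scanLastA row.reverse ((row.length : Int) - 1)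
  (PySem.List.pyRange start_point last_point 1).foldl (fun r i => r.set i.toNat 255) row

def draw_to_end_by_col (image_input : List (List Int)) : List Int :=
  -- col_image = [[] for i in range(28)]; for row in image: for item_n in range(len(row)): col_image[item_n].append(row[item_n])
  let col_image : List (List Int) :=
    image_input.foldl (fun ci row =>
      (List.range row.length).foldl (fun ci i => ci.modify i (fun c => c ++ [row.getD i 0])) ci)
      (List.replicate 28 [])
  -- new_image = []; for row in col_image: … ; new_image += new_row
  col_image.foldl (fun acc row => acc ++ fillRowA row) []

-- ===== PORT B =====
-- the inner-loop body of B: state = (emitted, buf, seen), one pixel v of the column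
def stepB (st : List Int × List Int × Bool) (v : Int) : List Int × List Int × Bool :=
  if v > 128 then
    (st.1 ++ (if st.2.2 then List.replicate st.2.1.length 255 else st.2.1), [v], true)
  else
    (st.1, st.2.1 ++ [v], st.2.2)

def draw_to_end_by_col_alt (image_input : List (List Int)) : List Int :=
  (List.range 28).foldl (fun out j =>
    -- emitted, buf, seen = [], [], False; for row in image_input: if j < len(row): …
    let st := image_input.foldl (fun st row =>
      match row[j]? with
      | some v => stepB st v
      | none => st) ([], [], false)
    out ++ (st.1 ++ st.2.1)) []

-- ===== PRECONDITION & SPEC =====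
-- Pre_ excludes images with a row longer than 28: there A's 'col_image[item_n]' raises IndexError.
def Pre_draw_to_end_by_col (image_input : List (List Int)) : Prop :=
  ∀ row ∈ image_input, row.length ≤ 28
instance (image_input : List (List Int)) : Decidable (Pre_draw_to_end_by_col image_input) := by
  unfold Pre_draw_to_end_by_col; infer_instance
def pvWitness_draw_to_end_by_col : List (List Int) := [[0, 200, 0], [255, 0, 0], [0, 0, 130]]

def Spec_draw_to_end_by_col (image_input : List (List Int)) (out : List Int) : Prop := out = draw_to_end_by_col_alt image_input
instance (image_input : List (List Int)) (out : List Int) : Decidable (Spec_draw_to_end_by_col image_input out) := by unfold Spec_draw_to_end_by_col; infer_instance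

-- ===== CLAIM (what is proved, stated in full; the proofs are below) =====
def Claim_equal_draw_to_end_by_col : Prop := ∀ (image_input : List (List Int)), Dom_draw_to_end_by_col image_input → Pre_draw_to_end_by_col image_input → Spec_draw_to_end_by_col image_input (draw_to_end_by_col image_input)
-- ===== LEMMAS AND PROOFS =====

-- the list of (Int) indices of bright pixels, with a general enumeration start
def brightOf (col : List Int) (s : Int) : List Int :=
  (PySem.List.enumerate col s).filterMap (fun p => if p.2 > 128 then some p.1 else none)

theorem brightOf_nil (s : Int) : brightOf [] s = [] := rfl

theorem brightOf_cons (x : Int) (xs : List Int) (s : Int) :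
    brightOf (x :: xs) s = (if x > 128 then [s] else []) ++ brightOf xs (s + 1) := by
  unfold brightOf
  rw [PySem.List.enumerate_cons, List.filterMap_cons]
  split_ifs with h <;> simp

theorem scanFirstA_eq (col : List Int) (s : Int) :
    scanFirstA col s = (brightOf col s).headD 0 := by
  induction col generalizing s with
  | nil => rfl
  | cons x xs ih =>
    rw [scanFirstA, brightOf_cons]
    split_ifs with h <;> simp [ih]

theorem scanFirstA_nonneg (col : List Int) (s : Int) (hs : 0 ≤ s) : 0 ≤ scanFirstA col s := by
  induction col generalizing s with
  | nil => simp [scanFirstA]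
  | cons x xs ih =>
    rw [scanFirstA]
    split_ifs with h
    · exact hs
    · exact ih (s + 1) (by omega)

theorem brightOf_append (xs ys : List Int) (s : Int) :
    brightOf (xs ++ ys) s = brightOf xs s ++ brightOf ys (s + xs.length) := by
  simp [brightOf, PySem.List.enumerate_append]

theorem scanLastA_eq (col : List Int) (s : Int) :
    scanLastA col.reverse (s + col.length - 1) = (brightOf col s).getLastD 0 := by
  induction col using List.reverseRecOn generalizing s with
  | nil => rfl
  | append_singleton ys y ih =>
    rw [List.reverse_append, brightOf_append]
    simp only [List.reverse_singleton, List.singleton_append, List.length_append,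
      List.length_singleton]
    rw [scanLastA]
    rw [brightOf_cons, brightOf_nil, List.append_nil]
    have hc : (((ys.length + 1 : Nat)) : Int) = (ys.length : Int) + 1 := by push_cast; ring
    split_ifs with h
    · simp [hc]
      omega
    · simp only [List.append_nil, hc]
      rw [show s + ((ys.length : Int) + 1) - 1 - 1 = s + (ys.length : Int) - 1 by ring, ih s]

-- A's fold of point assignments equals the conditional map
theorem fill_eq_map (col : List Int) (s l : Int) (hs : 0 ≤ s) :
    (PySem.List.pyRange s l 1).foldl (fun r i => r.set i.toNat 255) col
      = (PySem.List.enumerate col 0).map (fun p => if s ≤ p.1 ∧ p.1 < l then 255 else p.2) := by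
  by_cases hls : l ≤ s
  · rw [PySem.List.pyRange_one_eq_nil hls, List.foldl_nil]
    have : ∀ p ∈ PySem.List.enumerate col 0,
        (if s ≤ p.1 ∧ p.1 < l then (255 : Int) else p.2) = p.2 := by
      intro p _; rw [if_neg]; omega
    rw [List.map_congr_left this, PySem.List.map_snd_enumerate]
  · have hls' : s < l := by omega
    have hrec := fill_eq_map (col.set s.toNat 255) (s + 1) l (by omega)
    rw [PySem.List.pyRange_one_cons hls', List.foldl_cons, hrec]
    refine List.ext_getElem (by simp [PySem.List.length_enumerate]) ?_
    intro k h1 h2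
    simp only [List.getElem_map, PySem.List.getElem_enumerate]
    have hk : k < col.length := by simpa using h1
    by_cases hks : k = s.toNat
    · subst hks
      rw [if_neg (by omega), if_pos (by omega)]
      simp
    · have hne : (k : Int) ≠ s := by omega
      rw [List.getElem_set_ne (by omega)]
      by_cases hc : s ≤ (k : Int) ∧ (k : Int) < l
      · rw [if_pos (by omega), if_pos (by omega)]
      · rw [if_neg (by omega), if_neg (by omega)]
termination_by (l - s).toNat
decreasing_by omega

-- the per-column transform of A, in map form
theorem fillRowA_eq (col : List Int) :
    fillRowA col = (PySem.List.enumerate col 0).map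
      (fun p => if (brightOf col 0).headD 0 ≤ p.1 ∧ p.1 < (brightOf col 0).getLastD 0 then 255 else p.2) := by
  have h2 := scanLastA_eq col 0
  rw [show (0 : Int) + col.length - 1 = (col.length : Int) - 1 by ring] at h2
  rw [fillRowA, scanFirstA_eq, h2,
    fill_eq_map _ _ _ (by rw [← scanFirstA_eq]; exact scanFirstA_nonneg col 0 le_rfl)]

-- the conditional map, in slice form (for in-range endpoints)
theorem map_eq_slice (xs : List Int) (s l : Int) (hs : 0 ≤ s) (hsl : s ≤ l) (hl : l < xs.length) :
    (PySem.List.enumerate xs 0).map (fun p => if s ≤ p.1 ∧ p.1 < l then 255 else p.2)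
      = xs.take s.toNat ++ List.replicate (l - s).toNat 255 ++ xs.drop l.toNat := by
  have hsa : s.toNat ≤ xs.length := by omega
  have hla : l.toNat ≤ xs.length := by omega
  have hlt : (List.take s.toNat xs).length = s.toNat := by
    rw [List.length_take, Nat.min_eq_left hsa]
  have hlr : (List.replicate (l - s).toNat (255 : Int)).length = l.toNat - s.toNat := by
    rw [List.length_replicate]; omega
  have hltr : (List.take s.toNat xs ++ List.replicate (l - s).toNat (255 : Int)).length = l.toNat := by
    rw [List.length_append, hlt, hlr]; omega
  refine List.ext_getElem ?_ ?_
  · simp [PySem.List.length_enumerate]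
    omega
  · intro k h1 h2
    have hk : k < xs.length := by simpa [PySem.List.length_enumerate] using h1
    simp only [List.getElem_map, PySem.List.getElem_enumerate]
    by_cases hk1 : k < s.toNat
    · rw [if_neg (by omega), List.getElem_append_left (by omega),
        List.getElem_append_left (by omega), List.getElem_take]
    · by_cases hk2 : k < l.toNat
      · rw [if_pos (by omega), List.getElem_append_left (by rw [hltr]; omega),
          List.getElem_append_right (by omega), List.getElem_replicate]
      · rw [if_neg (by omega), List.getElem_append_right (by rw [hltr]; omega),
          List.getElem_drop]
        congr 1
        rw [hltr]
        omega

-- B's per-column stream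
def streamCol (col : List Int) : List Int × List Int × Bool :=
  col.foldl stepB ([], [], false)

-- characterization of the stream state after a whole column
theorem streamCol_char (xs : List Int) :
    (brightOf xs 0 = [] → streamCol xs = ([], xs, false)) ∧
    (brightOf xs 0 ≠ [] →
      streamCol xs = (xs.take ((brightOf xs 0).headD 0).toNat
            ++ List.replicate ((brightOf xs 0).getLastD 0 - (brightOf xs 0).headD 0).toNat 255,
          xs.drop ((brightOf xs 0).getLastD 0).toNat, true)
        ∧ 0 ≤ (brightOf xs 0).headD 0
        ∧ (brightOf xs 0).headD 0 ≤ (brightOf xs 0).getLastD 0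
        ∧ (brightOf xs 0).getLastD 0 < xs.length) := by
  induction xs using List.reverseRecOn with
  | nil => exact ⟨fun _ => rfl, fun h => absurd rfl h⟩
  | append_singleton ys y ih =>
    have hsnoc : brightOf (ys ++ [y]) 0
        = brightOf ys 0 ++ (if y > 128 then [(ys.length : Int)] else []) := by
      rw [brightOf_append, brightOf_cons, brightOf_nil]
      simp
    have hstep : streamCol (ys ++ [y]) = stepB (streamCol ys) y := by
      simp [streamCol, List.foldl_append]
    have hcast : ((ys.length : Int)).toNat = ys.length := Int.toNat_natCast _
    obtain ⟨ihe, ihne⟩ := ih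
    by_cases hy : y > 128
    · -- bright pixel appended: it becomes the last bright index ys.length
      rw [if_pos hy] at hsnoc
      refine ⟨fun h => ?_, fun _ => ?_⟩
      · rw [hsnoc] at h; simp at h
      · rw [hsnoc]
        by_cases hbo : brightOf ys 0 = []
        · rw [hbo]
          have hg : [(ys.length : Int)].getLastD 0 = (ys.length : Int) := rfl
          simp only [List.nil_append, List.headD_cons, hg]
          refine ⟨?_, Int.natCast_nonneg _, le_refl _, by simp⟩
          rw [hstep, ihe hbo, stepB, if_pos hy]
          simp [hcast]
        · obtain ⟨hys, h0, hsl, hlt⟩ := ihne hbo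
          set s := (brightOf ys 0).headD 0 with hsdef
          set l := (brightOf ys 0).getLastD 0 with hldef
          have hhead : (brightOf ys 0 ++ [(ys.length : Int)]).headD 0 = s := by
            cases h : brightOf ys 0 with
            | nil => exact absurd h hbo
            | cons a t => simp [hsdef, h]
          have hlast : (brightOf ys 0 ++ [(ys.length : Int)]).getLastD 0 = (ys.length : Int) := by
            simp
          rw [hhead, hlast]
          refine ⟨?_, h0, by omega, by simp⟩
          rw [hstep, hys, stepB, if_pos hy]
          simp only [if_true, List.length_drop]
          rw [List.take_append_of_le_length (show s.toNat ≤ ys.length by omega),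
            hcast, List.drop_left, List.append_assoc, ← List.replicate_add]
          have harith : (l - s).toNat + (ys.length - l.toNat) = ((ys.length : Int) - s).toNat := by
            omega
          rw [harith]
    · -- dark pixel appended: bright indices unchanged, it joins the buffer
      rw [if_neg hy] at hsnoc
      simp only [List.append_nil] at hsnoc
      refine ⟨fun h => ?_, fun hne => ?_⟩
      · rw [hsnoc] at h
        rw [hstep, ihe h, stepB, if_neg hy]
      · rw [hsnoc] at hne ⊢
        obtain ⟨hys, h0, hsl, hlt⟩ := ihne hne
        refine ⟨?_, h0, hsl, by simp only [List.length_append, List.length_cons, List.length_nil]; push_cast; omega⟩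
        rw [hstep, hys, stepB, if_neg hy]
        rw [List.take_append_of_le_length (by omega),
          List.drop_append_of_le_length (by omega)]

-- A's filled column equals B's streamed column, for every column
theorem fillRowA_eq_stream (col : List Int) :
    fillRowA col = (streamCol col).1 ++ (streamCol col).2.1 := by
  obtain ⟨he, hne⟩ := streamCol_char col
  by_cases hbo : brightOf col 0 = []
  · rw [he hbo, fillRowA_eq, hbo]
    simp only [List.headD_nil, List.getLastD_nil, List.nil_append]
    have hcg : ∀ p ∈ PySem.List.enumerate col 0,
        (if (0:Int) ≤ p.1 ∧ p.1 < 0 then (255:Int) else p.2) = p.2 := by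
      intro p _; rw [if_neg]; omega
    exact (List.map_congr_left hcg).trans (PySem.List.map_snd_enumerate col 0)
  · obtain ⟨hst, h0, hsl, hlt⟩ := hne hbo
    rw [hst, fillRowA_eq, map_eq_slice col _ _ h0 hsl hlt]

-- fold over a filterMap via an option-matching fold
theorem foldl_filterMap_opt (l : List (List Int)) (j : Nat)
    (g : List Int × List Int × Bool → Int → List Int × List Int × Bool)
    (init : List Int × List Int × Bool) :
    l.foldl (fun st row => match row[j]? with | some v => g st v | none => st) init
      = (l.filterMap (fun row => row[j]?)).foldl g init := by
  induction l generalizing init with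
  | nil => rfl
  | cons r t ih =>
    rw [List.foldl_cons, List.filterMap_cons]
    cases h : r[j]? with
    | none => exact ih init
    | some v => rw [List.foldl_cons]; exact ih (g init v)

-- inner append loop of A's transpose, pointwise
theorem inner_foldl (n : Nat) (ci : List (List Int)) (row : List Int) :
    ((List.range n).foldl (fun ci i => ci.modify i (fun c => c ++ [row.getD i 0])) ci).length = ci.length ∧
    ∀ j, ((List.range n).foldl (fun ci i => ci.modify i (fun c => c ++ [row.getD i 0])) ci)[j]?
      = if j < n then (ci[j]?).map (fun c => c ++ [row.getD j 0]) else ci[j]? := by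
  induction n with
  | zero => simp
  | succ m ih =>
    rw [List.range_succ, List.foldl_append, List.foldl_cons, List.foldl_nil]
    obtain ⟨ihl, ihe⟩ := ih
    constructor
    · rw [List.length_modify, ihl]
    · intro j
      rw [List.getElem?_modify, ihe]
      by_cases hjm : j = m
      · subst hjm
        rw [if_neg (by omega), if_pos (by omega)]
        cases ci[j]? <;> simp
      · by_cases hj : j < m
        · rw [if_pos hj, if_pos (by omega)]
          cases ci[j]? <;> simp [show m ≠ j from fun h => hjm h.symm]
        · rw [if_neg hj, if_neg (by omega)]
          cases ci[j]? <;> simp [show m ≠ j from fun h => hjm h.symm]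

-- outer loop of A's transpose: column j ends up being the filterMap of row[j]
theorem outer_foldl (img : List (List Int)) (ci : List (List Int))
    (h : ∀ row ∈ img, row.length ≤ ci.length) :
    (img.foldl (fun ci row =>
        (List.range row.length).foldl (fun ci i => ci.modify i (fun c => c ++ [row.getD i 0])) ci) ci).length
      = ci.length ∧
    ∀ (j : Nat), (img.foldl (fun ci row =>
        (List.range row.length).foldl (fun ci i => ci.modify i (fun c => c ++ [row.getD i 0])) ci) ci)[j]?
      = (ci[j]?).map (fun c => c ++ img.filterMap (fun row => row[j]?)) := by
  induction img generalizing ci with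
  | nil => simp
  | cons row rest ih =>
    rw [List.foldl_cons]
    obtain ⟨il, ie⟩ := inner_foldl row.length ci row
    have hrest : ∀ r ∈ rest, r.length ≤
        ((List.range row.length).foldl (fun ci i => ci.modify i (fun c => c ++ [row.getD i 0])) ci).length := by
      intro r hr; rw [il]; exact h r (List.mem_cons_of_mem _ hr)
    obtain ⟨ol, oe⟩ := ih _ hrest
    refine ⟨by rw [ol, il], ?_⟩
    intro j
    rw [oe j, ie j, List.filterMap_cons]
    by_cases hj : j < row.length
    · rw [if_pos hj]
      have hrj : row[j]? = some (row.getD j 0) := by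
        rw [List.getD_eq_getElem?_getD, List.getElem?_eq_getElem hj]
        simp
      rw [hrj]
      cases ci[j]? <;> simp
    · rw [if_neg hj]
      have hrj : row[j]? = none := List.getElem?_eq_none (by omega)
      rw [hrj]

theorem col_image_eq (img : List (List Int)) (h : ∀ row ∈ img, row.length ≤ 28) :
    img.foldl (fun ci row =>
        (List.range row.length).foldl (fun ci i => ci.modify i (fun c => c ++ [row.getD i 0])) ci)
      (List.replicate 28 ([] : List Int))
    = (List.range 28).map (fun j => img.filterMap (fun row => row[j]?)) := by
  obtain ⟨hl, he⟩ := outer_foldl img (List.replicate 28 ([] : List Int)) (by simpa using h)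
  apply List.ext_getElem?
  intro j
  rw [he j, List.getElem?_replicate]
  by_cases hj : j < 28
  · rw [if_pos hj, List.getElem?_map, List.getElem?_range hj]
    simp
  · rw [if_neg hj, List.getElem?_eq_none (by simp; omega)]
    simp

-- ===== VERDICT (by name: the statement is the Claim_ definition above) =====
theorem draw_to_end_by_col_spec : Claim_equal_draw_to_end_by_col := by
  intro img _ hpre
  unfold Spec_draw_to_end_by_col draw_to_end_by_col draw_to_end_by_col_alt
  rw [col_image_eq img hpre, List.foldl_map]
  congr 1
  funext acc j
  rw [fillRowA_eq_stream, foldl_filterMap_opt]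
  rfl
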